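-- pv_equiv track=rewrite | github.com/vaibhavi-r/CSE-415 | Assignment4/playa.py | maxOpenLenRow
-- ===== SOURCE A (Python) =====
-- def maxOpenLenRow(someState, rowNum, strict=False, currentSide="X"):
--     opposite = getOpposite(currentSide)
--     maxCount = 0
--     current = 0
--     someRow = someState[rowNum]
--     for cell in someRow:
--         if (cell == opposite or cell == '-') or (strict == True and cell == ' '):
--             if current > maxCount:
--                 maxCount = current
--             current = 0
--         else:
--              current += 1
--     if current > maxCount:
--                 maxCount = current
--     return maxCount
--
-- def getOpposite(current="X"):
--     if current == "X":
--         return "O"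
--     else:
--         return "X"
-- ===== SOURCE B (Python) =====
-- def maxOpenLenRow(someState, rowNum, strict=False, currentSide="X"):
--     opposite = "O" if currentSide == "X" else "X"
--
--     def blocked(c):
--         return c == opposite or c == '-' or (strict and c == ' ')
--
--     row = someState[rowNum]
--     n = len(row)
--     best = 0
--     i = 0
--     while i < n:
--         if blocked(row[i]):
--             i += 1
--         else:
--             j = i + 1
--             while j < n and not blocked(row[j]):
--                 j += 1
--             if j - i > best:
--                 best = j - i
--             i = j
--     return best
-- ===== Notes on version B (the rewrite author's own statement) =====
-- stated objective: alternative
-- what changed: B partitions the row into maximal open segments with a two-pointer scan (skip blocked cell, else advance a second pointer to the segment's end and take its length), instead of A's running counter that resets on blocked cells and needs a post-loop flush.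
import Mathlib
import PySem

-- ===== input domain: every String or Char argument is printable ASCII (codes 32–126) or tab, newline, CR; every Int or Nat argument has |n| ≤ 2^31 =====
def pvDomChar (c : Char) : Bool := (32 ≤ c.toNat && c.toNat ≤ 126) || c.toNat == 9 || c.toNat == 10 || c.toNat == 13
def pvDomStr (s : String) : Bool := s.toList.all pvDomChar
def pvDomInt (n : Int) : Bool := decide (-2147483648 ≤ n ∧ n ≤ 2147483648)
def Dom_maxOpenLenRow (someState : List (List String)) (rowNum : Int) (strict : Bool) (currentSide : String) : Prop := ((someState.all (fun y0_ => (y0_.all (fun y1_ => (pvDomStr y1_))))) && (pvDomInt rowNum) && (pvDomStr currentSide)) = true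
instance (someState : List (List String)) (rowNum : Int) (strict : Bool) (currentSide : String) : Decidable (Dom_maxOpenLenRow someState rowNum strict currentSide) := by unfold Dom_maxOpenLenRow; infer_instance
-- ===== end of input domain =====

-- B replaces A's running counter (reset on blocked cells + post-loop flush) by a two-pointer
-- scan over maximal open segments; alternative decomposition, same O(n) cost.

-- ===== PORT A =====
def pvGetOpposite (current : String) : String :=
  if current == "X" then "O" else "X"

def maxOpenLenRow (someState : List (List String)) (rowNum : Int) (strict : Bool) (currentSide : String) : Int :=
  let opposite := pvGetOpposite currentSide
  -- someState[rowNum]: IndexError (none) excluded by Pre_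
  match PySem.List.pyGet? someState rowNum with
  | none => 0
  | some someRow =>
    let st := someRow.foldl (fun (st : Int × Int) cell =>
        if (cell == opposite || cell == "-") || (strict == true && cell == " ") then
          (if st.2 > st.1 then st.2 else st.1, 0)
        else (st.1, st.2 + 1)) (0, 0)
    if st.2 > st.1 then st.2 else st.1

-- ===== PORT B =====
def pvBlocked (opposite : String) (strict : Bool) (cell : String) : Bool :=
  cell == opposite || cell == "-" || (strict && cell == " ")

-- Source B's outer while loop over the suffix starting at i; the inner `while j` pointer scan is the
-- count of the open prefix of the suffix.
def pvLongest (p : String → Bool) : List String → Int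
  | [] => 0
  | c :: rest =>
    if p c then pvLongest p rest
    else
      let run : Int := 1 + (rest.takeWhile (fun x => !p x)).length
      max run (pvLongest p (rest.dropWhile (fun x => !p x)))
termination_by l => l.length
decreasing_by
  · simp
  · have := List.length_dropWhile_le (fun x => !p x) rest
    simp; omega

def maxOpenLenRow_alt (someState : List (List String)) (rowNum : Int) (strict : Bool) (currentSide : String) : Int :=
  let opposite := if currentSide == "X" then "O" else "X"
  match PySem.List.pyGet? someState rowNum with
  | none => 0
  | some row => pvLongest (pvBlocked opposite strict) row

-- ===== PRECONDITION & SPEC =====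
-- A raises IndexError when rowNum is out of range for someState; exactly that is excluded.
def Pre_maxOpenLenRow (someState : List (List String)) (rowNum : Int) (strict : Bool) (currentSide : String) : Prop :=
  PySem.Raise.InRange someState.length rowNum
instance (someState : List (List String)) (rowNum : Int) (strict : Bool) (currentSide : String) : Decidable (Pre_maxOpenLenRow someState rowNum strict currentSide) := by unfold Pre_maxOpenLenRow; infer_instance

def pvWitness_maxOpenLenRow : List (List String) × Int × Bool × String := ([["X", " ", "O"]], 0, false, "X")

def Spec_maxOpenLenRow (someState : List (List String)) (rowNum : Int) (strict : Bool) (currentSide : String) (out : Int) : Prop := out = maxOpenLenRow_alt someState rowNum strict currentSide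
instance (someState : List (List String)) (rowNum : Int) (strict : Bool) (currentSide : String) (out : Int) : Decidable (Spec_maxOpenLenRow someState rowNum strict currentSide out) := by unfold Spec_maxOpenLenRow; infer_instance

-- ===== CLAIM (what is proved, stated in full; the proofs are below) =====
def Claim_equal_maxOpenLenRow : Prop := ∀ (someState : List (List String)) (rowNum : Int) (strict : Bool) (currentSide : String), Dom_maxOpenLenRow someState rowNum strict currentSide → Pre_maxOpenLenRow someState rowNum strict currentSide → Spec_maxOpenLenRow someState rowNum strict currentSide (maxOpenLenRow someState rowNum strict currentSide)

-- ===== LEMMAS AND PROOFS =====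

lemma pvLongest_cons_blocked (p : String → Bool) (c : String) (rest : List String) (hp : p c) :
    pvLongest p (c :: rest) = pvLongest p rest := by
  simp [pvLongest, hp]

lemma pvLongest_cons_open (p : String → Bool) (c : String) (rest : List String) (hp : ¬ p c) :
    pvLongest p (c :: rest) =
      max (1 + ((rest.takeWhile (fun x => !p x)).length : Int))
        (pvLongest p (rest.dropWhile (fun x => !p x))) := by
  simp [pvLongest, hp]

lemma pvLongest_nonneg (p : String → Bool) (l : List String) : 0 ≤ pvLongest p l := by
  fun_induction pvLongest p l with
  | case1 => simp
  | case2 c rest hp ih => exact ih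
  | case3 c rest hp run ih => omega

lemma pvLongest_split (p : String → Bool) (l : List String) :
    pvLongest p l =
      max ((l.takeWhile (fun x => !p x)).length : Int)
        (pvLongest p (l.dropWhile (fun x => !p x))) := by
  cases l with
  | nil => simp [pvLongest]
  | cons c rest =>
    by_cases hp : p c
    · have h0 := pvLongest_nonneg p rest
      rw [pvLongest_cons_blocked p c rest hp]
      simp [hp, pvLongest_cons_blocked p c rest hp]
      omega
    · rw [pvLongest_cons_open p c rest hp]
      simp [hp]
      omega

lemma foldA_eq (p : String → Bool) (l : List String) (m c : Int) (hm : 0 ≤ m) (hc : 0 ≤ c) :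
    (let st := l.foldl (fun (st : Int × Int) cell =>
        if p cell then (if st.2 > st.1 then st.2 else st.1, 0) else (st.1, st.2 + 1)) (m, c)
     if st.2 > st.1 then st.2 else st.1)
    = max m (max (c + ((l.takeWhile (fun x => !p x)).length : Int))
        (pvLongest p (l.dropWhile (fun x => !p x)))) := by
  induction l generalizing m c with
  | nil => simp [pvLongest]; omega
  | cons x r ih =>
    by_cases hp : p x
    · have hL := pvLongest_split p r
      have h0 := pvLongest_nonneg p (r.dropWhile (fun x => !p x))
      have htk : (0 : Int) ≤ ((r.takeWhile (fun x => !p x)).length : Int) := by positivity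
      simp only [List.foldl_cons, List.takeWhile_cons, List.dropWhile_cons, hp, if_true,
        Bool.not_true, Bool.false_eq_true, if_false]
      rw [ih (if c > m then c else m) 0 (by omega) le_rfl,
        pvLongest_cons_blocked p x r hp, hL]
      simp
      omega
    · simp only [List.foldl_cons, List.takeWhile_cons, List.dropWhile_cons,
        (by simp [hp] : p x = false), Bool.false_eq_true, if_false, Bool.not_false, if_true]
      rw [ih m (c + 1) hm (by omega)]
      simp
      omega

-- ===== VERDICT (by name: the statement is the Claim_ definition above) =====
theorem maxOpenLenRow_spec : Claim_equal_maxOpenLenRow := by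
  intro someState rowNum strict currentSide _hDom hPre
  unfold Spec_maxOpenLenRow maxOpenLenRow maxOpenLenRow_alt
  obtain ⟨row, hrow⟩ : ∃ row, PySem.List.pyGet? someState rowNum = some row := by
    rcases h : PySem.List.pyGet? someState rowNum with _ | row
    · exact absurd ((PySem.List.pyGet?_eq_none_iff someState rowNum).mp h)
        (by unfold Pre_maxOpenLenRow at hPre; exact not_not_intro hPre)
    · exact ⟨row, rfl⟩
  simp only [hrow]
  rw [show (if currentSide == "X" then "O" else "X") = pvGetOpposite currentSide from rfl]
  have hstep : (fun (st : Int × Int) cell =>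
        if (cell == pvGetOpposite currentSide || cell == "-" || strict == true && cell == " ") then
          (if st.2 > st.1 then st.2 else st.1, 0)
        else (st.1, st.2 + 1))
      = (fun (st : Int × Int) cell =>
        if pvBlocked (pvGetOpposite currentSide) strict cell then
          (if st.2 > st.1 then st.2 else st.1, 0)
        else (st.1, st.2 + 1)) := by
    funext st cell; simp [pvBlocked]
  rw [hstep]
  refine (foldA_eq (pvBlocked (pvGetOpposite currentSide) strict) row 0 0 le_rfl le_rfl).trans ?_
  have h0 := pvLongest_nonneg (pvBlocked (pvGetOpposite currentSide) strict) row
  have hL := pvLongest_split (pvBlocked (pvGetOpposite currentSide) strict) row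
  have htk : (0:Int) ≤ ((row.takeWhile (fun x => !pvBlocked (pvGetOpposite currentSide) strict x)).length : Int) := by positivity
  have h1 := pvLongest_nonneg (pvBlocked (pvGetOpposite currentSide) strict)
    (row.dropWhile (fun x => !pvBlocked (pvGetOpposite currentSide) strict x))
  omega
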